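-- pv_equiv track=rewrite | github.com/MattiaFiore/ESERCIZI_PYTHON | Python_base/random/Blackjack/soluzione/blackjack.py | calcola_somma
-- ===== SOURCE A (Python) =====
-- carte = {
--     '2': 2,
--     '3': 3,
--     '4': 4,
--     '5': 5,
--     '6': 6,
--     '7': 7,
--     '8': 8,
--     '9': 9,
--     '10': 10,
--     'Jack': 10,
--     'Queen': 10,
--     'King': 10,
--     'Ace': [1, 11]
-- }
--
-- def calcola_somma(mano):
--
--     valori = [0]
--     for carta in mano:
--
--         if carta == 'Ace':
--             valori = [x + 1 for x in valori if x + 1 <= 21] + [x + 11 for x in valori if x + 11 <= 21]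
--
--         else:
--             valori = [x + carte[carta] for x in valori if x + carte[carta] <=21 ]
--
--     return valori
-- ===== SOURCE B (Python) =====
-- carte = {
--     '2': 2,
--     '3': 3,
--     '4': 4,
--     '5': 5,
--     '6': 6,
--     '7': 7,
--     '8': 8,
--     '9': 9,
--     '10': 10,
--     'Jack': 10,
--     'Queen': 10,
--     'King': 10,
--     'Ace': [1, 11]
-- }
--
-- def calcola_somma(mano):
--     # one pass to split the hand: fixed sum of non-ace cards + number of aces
--     base = 0
--     aces = 0
--     for carta in mano:
--         if carta == 'Ace':
--             aces += 1
--         else: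
--             base += carte[carta]
--     # enumerate the ace value combinations once, filter against 21 only at the end
--     combos = [0]
--     for _ in range(aces):
--         combos = [s + 1 for s in combos] + [s + 11 for s in combos]
--     return [base + s for s in combos if base + s <= 21]
-- ===== Notes on version B (the rewrite author's own statement) =====
-- stated objective: alternative
-- what changed: B splits the computation into a base-sum/ace-count pass and a separate ace-combination enumeration with a single final <=21 filter, instead of A's single interleaved fold that filters after every card.
-- outside the precondition, e.g. on calcola_somma(['9', '9', '9', 'Joker']): A returns [], B raises KeyError
import Mathlib
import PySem

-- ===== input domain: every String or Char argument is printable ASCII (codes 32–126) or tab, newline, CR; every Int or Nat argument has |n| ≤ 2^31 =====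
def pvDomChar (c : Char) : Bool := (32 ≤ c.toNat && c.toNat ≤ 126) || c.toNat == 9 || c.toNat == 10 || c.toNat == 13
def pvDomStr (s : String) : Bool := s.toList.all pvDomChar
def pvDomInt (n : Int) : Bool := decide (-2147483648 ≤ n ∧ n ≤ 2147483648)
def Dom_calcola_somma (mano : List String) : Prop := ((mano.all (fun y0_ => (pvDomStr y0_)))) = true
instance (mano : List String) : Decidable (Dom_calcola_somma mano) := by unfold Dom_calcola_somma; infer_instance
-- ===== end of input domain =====

-- B separates the hand into a non-ace base sum plus an ace count, enumerates ace combinations once,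
-- and filters against 21 only at the end, instead of A's single fold that filters after every card.

-- the module-level dict 'carte', restricted to its Int-valued entries; the 'Ace' entry [1, 11] is not an
-- Int and is unreachable in both programs (the 'carta == "Ace"' branch is taken first), so it is omitted.
def carteVal? (c : String) : Option Int :=
  if c = "2" then some 2
  else if c = "3" then some 3
  else if c = "4" then some 4
  else if c = "5" then some 5
  else if c = "6" then some 6
  else if c = "7" then some 7
  else if c = "8" then some 8
  else if c = "9" then some 9
  else if c = "10" then some 10
  else if c = "Jack" then some 10
  else if c = "Queen" then some 10
  else if c = "King" then some 10
  else none

-- ===== PORT A =====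
def stepA (valori : List Int) (carta : String) : List Int :=
  if carta = "Ace" then
    (valori.filter (fun x => x + 1 ≤ 21)).map (fun x => x + 1)
      ++ (valori.filter (fun x => x + 11 ≤ 21)).map (fun x => x + 11)
  else
    match carteVal? carta with
    | some v => (valori.filter (fun x => x + v ≤ 21)).map (fun x => x + v)
    | none => []  -- KeyError in Python; excluded by Pre_calcola_somma

def calcola_somma (mano : List String) : List Int :=
  mano.foldl stepA [0]

-- ===== PORT B =====
def stepB (p : Int × Nat) (carta : String) : Int × Nat :=
  if carta = "Ace" then (p.1, p.2 + 1)
  else (p.1 + (carteVal? carta).getD 0, p.2)  -- getD: the none case is a KeyError in Python, excluded by Pre_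

def splitStep (cs : List Int) (_ : Nat) : List Int :=
  cs.map (fun s => s + 1) ++ cs.map (fun s => s + 11)

def calcola_somma_alt (mano : List String) : List Int :=
  let p := mano.foldl stepB (0, 0)
  let combos := (List.range p.2).foldl splitStep [0]
  (combos.filter (fun s => p.1 + s ≤ 21)).map (fun s => p.1 + s)

-- ===== PRECONDITION & SPEC =====
-- Pre_ excludes hands containing a string that is not a key of 'carte': B raises KeyError there, and so
-- does A except when every running sum has exceeded 21 before the unknown card is reached, where A's
-- comprehension over the empty list never evaluates carte[carta] and A returns the empty list (see cite).
def Pre_calcola_somma (mano : List String) : Prop :=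
  ∀ c ∈ mano, c ∈ (["2", "3", "4", "5", "6", "7", "8", "9", "10", "Jack", "Queen", "King", "Ace"] : List String)
instance (mano : List String) : Decidable (Pre_calcola_somma mano) := by unfold Pre_calcola_somma; infer_instance

def pvWitness_calcola_somma : List String := ["King", "Queen", "Ace", "Ace"]

def Spec_calcola_somma (mano : List String) (out : List Int) : Prop := out = calcola_somma_alt mano
instance (mano : List String) (out : List Int) : Decidable (Spec_calcola_somma mano out) := by unfold Spec_calcola_somma; infer_instance

-- ===== CLAIM (what is proved, stated in full; the proofs are below) =====
def Claim_equal_calcola_somma : Prop := ∀ (mano : List String), Dom_calcola_somma mano → Pre_calcola_somma mano → Spec_calcola_somma mano (calcola_somma mano)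

-- ===== LEMMAS AND PROOFS =====

-- the unfiltered version of A's per-card step
def expandStep (V : List Int) (c : String) : List Int :=
  if c = "Ace" then V.map (fun x => x + 1) ++ V.map (fun x => x + 11)
  else V.map (fun x => x + (carteVal? c).getD 0)

def f21 (V : List Int) : List Int := V.filter (fun x => x ≤ 21)

-- proof-side recursive base sum / ace count
def baseR : List String → Int
  | [] => 0
  | c :: r => (if c = "Ace" then 0 else (carteVal? c).getD 0) + baseR r

def acesR : List String → Nat
  | [] => 0
  | c :: r => (if c = "Ace" then 1 else 0) + acesR r

def combosFold (n : Nat) : List Int := (List.range n).foldl splitStep [0]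

theorem key_cases (c : String)
    (hc : c ∈ (["2", "3", "4", "5", "6", "7", "8", "9", "10", "Jack", "Queen", "King", "Ace"] : List String))
    (hne : c ≠ "Ace") : carteVal? c = some ((carteVal? c).getD 0) := by
  simp only [List.mem_cons, List.not_mem_nil, or_false] at hc
  rcases hc with rfl|rfl|rfl|rfl|rfl|rfl|rfl|rfl|rfl|rfl|rfl|rfl|rfl
  all_goals first
    | exact absurd rfl hne
    | decide

theorem fmap_filter (v : Int) (hv : 0 ≤ v) (W : List Int) :
    f21 ((f21 W).map (fun x => x + v)) = f21 (W.map (fun x => x + v)) := by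
  unfold f21
  rw [List.filter_map, List.filter_map, List.filter_filter]
  simp only [Function.comp_def]
  have h : ∀ x : Int, (decide (x + v ≤ 21) && decide (x ≤ 21)) = decide (x + v ≤ 21) := by
    intro x
    by_cases hxv : x + v ≤ 21
    · have hx : x ≤ 21 := by omega
      simp [hxv, hx]
    · simp [hxv]
  rw [show (fun x : Int => decide (x + v ≤ 21) && decide (x ≤ 21))
      = (fun x : Int => decide (x + v ≤ 21)) from funext h]

theorem val_getD_nonneg (c : String) : 0 ≤ (carteVal? c).getD 0 := by
  by_cases h1 : c = "2"; · subst h1; decide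
  by_cases h2 : c = "3"; · subst h2; decide
  by_cases h3 : c = "4"; · subst h3; decide
  by_cases h4 : c = "5"; · subst h4; decide
  by_cases h5 : c = "6"; · subst h5; decide
  by_cases h6 : c = "7"; · subst h6; decide
  by_cases h7 : c = "8"; · subst h7; decide
  by_cases h8 : c = "9"; · subst h8; decide
  by_cases h9 : c = "10"; · subst h9; decide
  by_cases h10 : c = "Jack"; · subst h10; decide
  by_cases h11 : c = "Queen"; · subst h11; decide
  by_cases h12 : c = "King"; · subst h12; decide
  have hnone : carteVal? c = none := by
    unfold carteVal?
    simp [h1, h2, h3, h4, h5, h6, h7, h8, h9, h10, h11, h12]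
  rw [hnone]
  decide

theorem fmap_congr (v : Int) (hv : 0 ≤ v) (W1 W2 : List Int) (h : f21 W1 = f21 W2) :
    f21 (W1.map (fun x => x + v)) = f21 (W2.map (fun x => x + v)) := by
  rw [← fmap_filter v hv W1, h, fmap_filter v hv W2]

theorem f21_append (a b : List Int) : f21 (a ++ b) = f21 a ++ f21 b := by
  simp [f21]

theorem step_congr (c : String)
    (W1 W2 : List Int) (h : f21 W1 = f21 W2) :
    f21 (expandStep W1 c) = f21 (expandStep W2 c) := by
  unfold expandStep
  by_cases hA : c = "Ace"
  · rw [if_pos hA, if_pos hA, f21_append, f21_append,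
      fmap_congr 1 (by norm_num) W1 W2 h, fmap_congr 11 (by norm_num) W1 W2 h]
  · rw [if_neg hA, if_neg hA, fmap_congr _ (val_getD_nonneg c) W1 W2 h]

theorem foldl_expand_congr (r : List String) :
    ∀ (W1 W2 : List Int), f21 W1 = f21 W2 →
    f21 (r.foldl expandStep W1) = f21 (r.foldl expandStep W2) := by
  induction r with
  | nil => exact fun _ _ h => h
  | cons c r ih => exact fun W1 W2 h => ih _ _ (step_congr c W1 W2 h)

theorem stepA_char (V : List Int) (c : String)
    (hc : c ∈ (["2", "3", "4", "5", "6", "7", "8", "9", "10", "Jack", "Queen", "King", "Ace"] : List String)) :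
    stepA V c = f21 (expandStep V c) := by
  unfold stepA expandStep
  by_cases hA : c = "Ace"
  · rw [if_pos hA, if_pos hA, f21_append]
    simp [f21, List.filter_map, Function.comp_def]
  · rw [if_neg hA, if_neg hA, key_cases c hc hA]
    simp [f21, List.filter_map, Function.comp_def]

theorem foldA_eq (r : List String) (hr : Pre_calcola_somma r) :
    ∀ (V : List Int), r.foldl stepA (f21 V) = f21 (r.foldl expandStep V) := by
  induction r with
  | nil => exact fun _ => rfl
  | cons c r ih =>
    intro V
    have hc : c ∈ _ := hr c List.mem_cons_self
    have hr' : Pre_calcola_somma r := fun d hd => hr d (List.mem_cons_of_mem c hd)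
    show r.foldl stepA (stepA (f21 V) c) = f21 (r.foldl expandStep (expandStep V c))
    rw [stepA_char (f21 V) c hc, ih hr' (expandStep (f21 V) c)]
    exact foldl_expand_congr r _ _ (step_congr c (f21 V) V (by simp [f21]))

theorem combosFold_succ (n : Nat) : combosFold (n + 1) = splitStep (combosFold n) n := by
  unfold combosFold
  rw [List.range_succ, List.foldl_append]
  rfl

theorem expand_combos (r : List String) (n : Nat) (b : Int) :
    r.foldl expandStep ((combosFold n).map (fun x => x + b))
      = (combosFold (n + acesR r)).map (fun x => x + (b + baseR r)) := by
  induction r generalizing n b with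
  | nil => simp [acesR, baseR]
  | cons c r ih =>
    by_cases hA : c = "Ace"
    · have hstep : expandStep ((combosFold n).map (fun x => x + b)) c
          = (combosFold (n + 1)).map (fun x => x + b) := by
        rw [combosFold_succ]
        simp only [expandStep, if_pos hA, splitStep, List.map_append, List.map_map,
          Function.comp_def]
        have h1 : (fun x : Int => x + b + 1) = (fun x => x + 1 + b) := funext fun x => by ring
        have h11 : (fun x : Int => x + b + 11) = (fun x => x + 11 + b) := funext fun x => by ring
        rw [h1, h11]
      show r.foldl expandStep (expandStep ((combosFold n).map (fun x => x + b)) c) = _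
      rw [hstep, ih]
      have hn : n + 1 + acesR r = n + acesR (c :: r) := by simp [acesR, hA]; omega
      simp [hn, baseR, hA]
    · have hstep : expandStep ((combosFold n).map (fun x => x + b)) c
          = (combosFold n).map (fun x => x + (b + (carteVal? c).getD 0)) := by
        simp only [expandStep, if_neg hA, List.map_map, Function.comp_def]
        have h : (fun x : Int => x + b + (carteVal? c).getD 0)
            = (fun x => x + (b + (carteVal? c).getD 0)) := funext fun x => by ring
        rw [h]
      show r.foldl expandStep (expandStep ((combosFold n).map (fun x => x + b)) c) = _
      rw [hstep, ih]
      have hb : (fun x : Int => x + (b + (carteVal? c).getD 0 + baseR r))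
          = (fun x => x + (b + baseR (c :: r))) := funext fun x => by simp [baseR, hA]; ring
      simp [acesR, hA, hb]

theorem foldB_eq (r : List String) : ∀ (b : Int) (n : Nat),
    r.foldl stepB (b, n) = (b + baseR r, n + acesR r) := by
  induction r with
  | nil => simp [baseR, acesR]
  | cons c r ih =>
    intro b n
    by_cases hA : c = "Ace" <;>
      simp [stepB, hA, ih, baseR, acesR] <;> ring

-- ===== VERDICT (by name: the statement is the Claim_ definition above) =====
theorem calcola_somma_spec : Claim_equal_calcola_somma := by
  intro mano _ hpre
  unfold Spec_calcola_somma calcola_somma calcola_somma_alt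
  rw [foldB_eq mano 0 0]
  have h0 : ([0] : List Int) = f21 (((combosFold 0).map (fun x => x + 0)) : List Int) := by decide
  rw [show (List.foldl stepA [0] mano) = mano.foldl stepA (f21 ((combosFold 0).map (fun x => x + 0))) from by rw [← h0],
    foldA_eq mano hpre, expand_combos mano 0 0]
  simp only [zero_add]
  have hp : (fun x : Int => decide (x + baseR mano ≤ 21)) = (fun x => decide (baseR mano + x ≤ 21)) :=
    funext fun x => by rw [Int.add_comm]
  have hf : (fun x : Int => x + baseR mano) = (fun x => baseR mano + x) :=
    funext fun x => Int.add_comm x _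
  rw [f21, List.filter_map, Function.comp_def]
  simp only [hp, hf]
  rfl
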